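-- pv_equiv track=rewrite | github.com/Dachaes/algorithm | 01. 이것이 코딩 테스트다 - 나동빈/01. 그리디/02. 기출 문제/06-5. 무지의 먹방 라이브 (p. 316) - 효율성 실패.py | solution
-- ===== SOURCE A (Python) =====
-- def solution(food_times, k):
--     len_time = len(food_times)                      # (ex: [4 4 4 7 7 9] -> 6)
--     previous_time = 0
--
--     # 0. 먹을 음식이 없을 때 + 먹을 시간 k가 너무 많아서 결국 다 먹게 될 때
--     if k >= sum(food_times):
--         return -1
--     # 1, 2
--     for j in range(min(food_times), max(food_times) + 1):
--         current_time = j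
--         cnt = food_times.count(current_time)
--         if cnt > 0:
--             time = current_time - previous_time
--             # 1. 시간 k가 충분할 때 (ex: [4 4 4 7 7 9], k = 25 -> [0 0 0 3 3 5], k = 1)
--             if k >= (time * len_time):                  # 1-1. k초에서 묶음으로 빼기
--                 k -= (time * len_time)
--                 len_time -= cnt
--                 previous_time = current_time
--
--             # 2. 시간 k가 충분하지 않아서 묶음으로 뺄셈이 되지 않을 때 (ex: [4 4 4 7 7 9], k = 10)
--             else:
--                 k = k % len_time                        # 2-1. 마지막으로 먹은 음식 찾기 (k = 10 % 6 -> 4)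
--                 if k == 0:                              # 2-2. 다음으로 먹을 음식 순서를 order에 저장
--                     order = 1
--                 else:
--                     order = k + 1
--                 for i in range(len(food_times)):
--                     if food_times[i] >= current_time:
--                         order -= 1
--                     if order == 0:
--                         return i + 1
-- ===== SOURCE B (Python) =====
-- def solution(food_times, k):
--     # Sort (index, time) pairs by time once; drain whole groups with a pointer
--     # over the sorted pairs (no count() and no min..max integer scan), and pick
--     # the answer by sorting the surviving indices and indexing directly.
--     if k >= sum(food_times):
--         return -1
--     pairs = sorted(enumerate(food_times), key=lambda p: p[1])
--     n = len(pairs)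
--     prev = 0
--     idx = 0
--     while True:
--         t = pairs[idx][1]
--         need = (t - prev) * (n - idx)
--         if k >= need:
--             k -= need
--             prev = t
--             while idx < n and pairs[idx][1] == t:
--                 idx += 1
--         else:
--             rest = sorted(i for i, _ in pairs[idx:])
--             return rest[k % (n - idx)] + 1
-- ===== Notes on version B (the rewrite author's own statement) =====
-- stated objective: faster
-- what changed: B sorts the (index, time) pairs by time once and drains whole groups with a pointer over that sorted list (no count() calls and no scan of every integer between min and max), then selects the answer by sorting the surviving indices and indexing directly instead of A's decrementing scan of the original list; intended as faster (O(n log n) vs O((max-min)*n)) - a timing run measured B 490x faster at the largest size both finished (n=4096) and A timing out above while B returned, but could not fully confirm the label.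
import Mathlib
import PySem

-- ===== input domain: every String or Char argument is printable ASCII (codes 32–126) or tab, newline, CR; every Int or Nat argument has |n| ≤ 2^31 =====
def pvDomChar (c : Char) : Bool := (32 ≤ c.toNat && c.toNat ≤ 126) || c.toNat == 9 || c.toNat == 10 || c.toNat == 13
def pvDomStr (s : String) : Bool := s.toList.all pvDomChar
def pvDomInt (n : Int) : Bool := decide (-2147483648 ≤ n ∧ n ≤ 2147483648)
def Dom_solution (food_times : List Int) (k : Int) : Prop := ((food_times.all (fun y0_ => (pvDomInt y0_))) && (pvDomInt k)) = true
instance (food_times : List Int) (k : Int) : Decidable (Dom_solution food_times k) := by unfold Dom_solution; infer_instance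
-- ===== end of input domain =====

-- B sorts the (index, time) pairs by time once and drains whole groups with a pointer over
-- the sorted pairs, selecting by sorting the surviving indices; intended as faster
-- (measured 490x at n=4096, unconfirmed at larger sizes where A times out).

-- ===== PORT A =====
-- inner loop of A: for i in range(len(food_times)): if food_times[i] >= current: order -= 1; if order == 0: return i+1
def solInnerA (cur : Int) : List Int → Int → Int → Option Int
  | [], _, _ => none
  | f :: fs, order, i =>
    let order' := if cur ≤ f then order - 1 else order
    if order' = 0 then some (i + 1) else solInnerA cur fs order' (i + 1)

-- main loop of A over j in range(min(food_times), max(food_times)+1)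
def solLoopA (food : List Int) : List Int → Int → Int → Int → Option Int
  | [], _, _, _ => none
  | j :: js, k, len_time, previous_time =>
    let cnt : Int := (PySem.List.count food j : Int)
    if 0 < cnt then
      let time := j - previous_time
      if time * len_time ≤ k then
        solLoopA food js (k - time * len_time) (len_time - cnt) j
      else
        let k' := PySem.Int.mod k len_time
        let order := if k' = 0 then 1 else k' + 1
        solInnerA j food order 0
    else solLoopA food js k len_time previous_time

def solution (food_times : List Int) (k : Int) : Int :=
  if food_times.sum ≤ k then -1
  else
    match PySem.List.min? food_times (fun x => x), PySem.List.max? food_times (fun x => x) with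
    | some mn, some mx =>
      (solLoopA food_times (PySem.List.pyRange mn (mx + 1) 1) k (PySem.List.len food_times) 0).getD 0
    | _, _ => 0   -- min() of the empty list raises ValueError in Python (outside Pre_)

-- ===== PORT B =====
-- B's while-True loop over the sorted (index, time) pairs; the nil case is Python's
-- IndexError on pairs[0] (unreachable while k < sum, which Pre_ + the guard ensure);
-- the inner 'while pairs[i][1] == t: i += 1; pairs = pairs[i:]' is dropWhile.
def solLoopB : List (Int × Int) → Int → Int → Int
  | [], _, _ => 0
  | (i, t) :: rest, k, prev =>
    let need := (t - prev) * (PySem.List.len ((i, t) :: rest))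
    if need ≤ k then
      solLoopB (((i, t) :: rest).dropWhile (fun p => decide (p.2 = t))) (k - need) t
    else
      PySem.List.pyGetD
        (PySem.List.sorted (((i, t) :: rest).map Prod.fst) (fun x => x) false)
        (PySem.Int.mod k (PySem.List.len ((i, t) :: rest))) 0 + 1
termination_by l => l.length
decreasing_by
  simp only [List.dropWhile_cons, decide_eq_true_eq, if_true, List.length_cons]
  have := List.length_dropWhile_le (fun p : Int × Int => decide (p.2 = t)) rest
  omega

def solution_alt (food_times : List Int) (k : Int) : Int :=
  if food_times.sum ≤ k then -1
  else
    solLoopB (PySem.List.sorted (PySem.List.enumerate food_times 0) (fun p => p.2) false) k 0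

-- ===== PRECONDITION & SPEC =====
-- Pre_ excludes only the empty list with k < 0, on which A raises ValueError (min of empty sequence).
def Pre_solution (food_times : List Int) (k : Int) : Prop := food_times ≠ [] ∨ 0 ≤ k
instance (food_times : List Int) (k : Int) : Decidable (Pre_solution food_times k) := by unfold Pre_solution; infer_instance
def pvWitness_solution : List Int × Int := ([4, 4, 4, 7, 7, 9], 15)
def Spec_solution (food_times : List Int) (k : Int) (out : Int) : Prop := out = solution_alt food_times k
instance (food_times : List Int) (k : Int) (out : Int) : Decidable (Spec_solution food_times k out) := by unfold Spec_solution; infer_instance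

-- ===== CLAIM (what is proved, stated in full; the proofs are below) =====
def Claim_equal_solution : Prop := ∀ (food_times : List Int) (k : Int), Dom_solution food_times k → Pre_solution food_times k → Spec_solution food_times k (solution food_times k)

-- ===== LEMMAS AND PROOFS =====

-- A's loop skips every value that does not occur in the list
theorem solLoopA_filter (food : List Int) : ∀ (L : List Int) (k l p : Int),
    solLoopA food L k l p = solLoopA food (L.filter (fun j => decide (j ∈ food))) k l p := by
  intro L
  induction L with
  | nil => intro k l p; rfl
  | cons j js ih =>
    intro k l p
    by_cases hj : j ∈ food
    · have hc : 0 < ((PySem.List.count food j : Nat) : Int) := by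
        have := List.count_pos_iff.mpr hj
        rw [PySem.List.count_eq]
        omega
      rw [List.filter_cons_of_pos (by simpa using hj)]
      simp only [solLoopA, if_pos hc]
      split
      · exact ih _ _ _
      · rfl
    · have hc : ¬ (0 < ((PySem.List.count food j : Nat) : Int)) := by
        rw [PySem.List.count_eq]
        have : List.count j food = 0 := List.count_eq_zero.mpr hj
        omega
      rw [List.filter_cons_of_neg (by simpa using hj)]
      simp only [solLoopA, if_neg hc]
      exact ih k l p

-- the present values between min and max, in order, are exactly sorted(set(food))
theorem solValues_eq (food : List Int) (mn mx : Int)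
    (hmn : PySem.List.min? food (fun x => x) = some mn)
    (hmx : PySem.List.max? food (fun x => x) = some mx) :
    (PySem.List.pyRange mn (mx + 1) 1).filter (fun j => decide (j ∈ food)) =
      PySem.List.sorted (PySem.Set.ofList food) (fun x => x) false := by
  symm
  apply PySem.List.sorted_eq_of_perm_of_pairwise_lt
  · rw [List.perm_ext_iff_of_nodup (List.Nodup.filter _ (PySem.List.nodup_pyRange_one mn (mx+1)))
      (PySem.Set.nodup_ofList food)]
    intro a
    simp only [List.mem_filter, PySem.List.mem_pyRange_one, PySem.Set.mem_ofList,
      decide_eq_true_eq]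
    constructor
    · rintro ⟨_, ha⟩; exact ha
    · intro ha
      refine ⟨⟨PySem.List.min?_isMin hmn a ha, ?_⟩, ha⟩
      have := PySem.List.max?_isMax hmx a ha
      omega
  · exact List.Pairwise.filter _ (PySem.List.pairwise_lt_pyRange_one mn (mx+1))

-- A's selection scan returns the (r+1)-th index (1-based) whose value is ≥ cur
theorem solInnerA_char (cur : Int) : ∀ (fs : List Int) (r : Nat) (i : Int),
    solInnerA cur fs ((r : Int) + 1) i =
      ((((PySem.List.enumerate fs i).filter (fun q => decide (cur ≤ q.2))).map Prod.fst)[r]?).map (· + 1) := by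
  intro fs
  induction fs with
  | nil => intro r i; simp [solInnerA, PySem.List.enumerate_nil]
  | cons f fs ih =>
    intro r i
    rw [PySem.List.enumerate_cons]
    by_cases hf : cur ≤ f
    · rw [List.filter_cons_of_pos (by simpa using hf)]
      cases r with
      | zero =>
        simp [solInnerA, hf]
      | succ n =>
        have h1 : ((((n : Nat) + 1 : Nat) : Int) + 1 - 1) = ((n : Int) + 1) := by push_cast; ring
        simp only [solInnerA, if_pos hf, h1]
        rw [if_neg (by omega : ¬ ((n : Int) + 1 = 0))]
        rw [ih n (i + 1)]
        simp
    · rw [List.filter_cons_of_neg (by simpa using hf)]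
      simp only [solInnerA, if_neg hf]
      rw [if_neg (by omega : ¬ ((r : Int) + 1 = 0))]
      exact ih r (i + 1)

-- a nondecreasing list all of whose values are ≥ t: dropping the leading t's = keeping the values > t
theorem dropWhile_eq_filter_of_sorted (t : Int) : ∀ (Q : List (Int × Int)),
    Q.Pairwise (fun a b => a.2 ≤ b.2) → (∀ q ∈ Q, t ≤ q.2) →
    Q.dropWhile (fun p => decide (p.2 = t)) = Q.filter (fun q => decide (t < q.2)) := by
  intro Q
  induction Q with
  | nil => intro _ _; rfl
  | cons q Q' ih =>
    intro hpw hge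
    have hqt : t ≤ q.2 := hge q (by simp)
    by_cases hq : q.2 = t
    · rw [List.dropWhile_cons_of_pos (by simpa using hq)]
      rw [List.filter_cons_of_neg (by simp [hq])]
      exact ih (List.pairwise_cons.mp hpw).2 (fun p hp => hge p (by simp [hp]))
    · rw [List.dropWhile_cons_of_neg (by simpa using hq)]
      rw [List.filter_cons_of_pos (by simp; omega)]
      rw [List.filter_eq_self.mpr]
      intro b hb
      have := (List.pairwise_cons.mp hpw).1 b hb
      simp
      omega

-- a list's length splits into the elements satisfying p and those not (no library lemma found)
theorem countP_not_aux {α : Type} (p : α → Bool) : ∀ l : List α,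
    l.countP p + l.countP (fun a => !p a) = l.length := by
  intro l
  induction l with
  | nil => rfl
  | cons x xs ih =>
    simp only [List.countP_cons, List.length_cons, ← ih]
    by_cases hx : p x = true <;> simp [hx] <;> omega

-- the parallel-loop invariant: A's distinct-sorted-values loop equals B's sorted-pairs loop
theorem solLoop_eq (food : List Int) : ∀ (V : List Int) (Q : List (Int × Int)) (k l p : Int) (C : Int → Bool),
    V.Pairwise (· < ·) →
    (∀ x, x ∈ V ↔ x ∈ food ∧ C x = true) →
    (∀ x y : Int, C x = true → x ≤ y → C y = true) →
    Q.Pairwise (fun a b => a.2 ≤ b.2) →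
    Q.Perm ((PySem.List.enumerate food 0).filter (fun q => C q.2)) →
    l = (Q.length : Int) →
    (solLoopA food V k l p).getD 0 = solLoopB Q k p := by
  intro V
  induction V with
  | nil =>
    intro Q k l p C _ hV _ _ hQ _
    have hfil : (PySem.List.enumerate food 0).filter (fun q => C q.2) = [] := by
      rw [List.filter_eq_nil_iff]
      intro q hq hCq
      have hmem : q.2 ∈ food := by
        have h := PySem.List.map_snd_enumerate food 0
        rw [← h]
        exact List.mem_map_of_mem hq
      have : q.2 ∈ ([] : List Int) := (hV q.2).mpr ⟨hmem, hCq⟩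
      simp at this
    have hQnil : Q = [] := List.perm_nil.mp (hfil ▸ hQ)
    subst hQnil
    simp [solLoopA, solLoopB]
  | cons t ts ih =>
    intro Q k l p C hpwV hV hC hpwQ hQ hl
    have hmemt := (hV t).mp (List.mem_cons_self)
    have htf : t ∈ food := hmemt.1
    have hCt : C t = true := hmemt.2
    -- a pair with time t is in the filtered enumeration
    obtain ⟨qt, hqtE, hqt2⟩ : ∃ q ∈ PySem.List.enumerate food 0, q.2 = t := by
      have h := PySem.List.map_snd_enumerate food 0
      rw [← h] at htf
      obtain ⟨q, hq, hq2⟩ := List.mem_map.mp htf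
      exact ⟨q, hq, hq2⟩
    have hqtF : qt ∈ (PySem.List.enumerate food 0).filter (fun q => C q.2) := by
      rw [List.mem_filter]
      exact ⟨hqtE, by rw [hqt2]; exact hCt⟩
    have hqtQ : qt ∈ Q := hQ.mem_iff.mpr hqtF
    -- every time in Q is ≥ t
    have ht_le_all : ∀ q ∈ Q, t ≤ q.2 := by
      intro q hq
      have hqF := hQ.subset hq
      rw [List.mem_filter] at hqF
      have hqfood : q.2 ∈ food := by
        have h := PySem.List.map_snd_enumerate food 0
        rw [← h]
        exact List.mem_map_of_mem hqF.1
      have hqV : q.2 ∈ t :: ts := (hV q.2).mpr ⟨hqfood, hqF.2⟩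
      rcases List.mem_cons.mp hqV with h | h
      · omega
      · have := (List.pairwise_cons.mp hpwV).1 q.2 h
        omega
    cases Q with
    | nil => simp at hqtQ
    | cons q0 Qt =>
      obtain ⟨i0, t0⟩ := q0
      have ht0 : t0 = t := by
        have h1 : t ≤ t0 := by simpa using ht_le_all (i0, t0) (by simp)
        have h2 : t0 ≤ qt.2 := by
          rcases List.mem_cons.mp hqtQ with h | h
          · simp [h]
          · simpa using (List.pairwise_cons.mp hpwQ).1 qt h
        omega
      have ht0' : t = t0 := ht0.symm
      subst ht0'
      have hcntpos : 0 < ((PySem.List.count food t : Nat) : Int) := by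
        have := List.count_pos_iff.mpr htf
        rw [PySem.List.count_eq]
        omega
      have hlpos : 0 < l := by
        rw [hl]
        simp
      -- the countP of time-t pairs in Q is food.count t
      have hcnt : (((i0, t) :: Qt).countP (fun q => decide (q.2 = t)) : Int)
          = ((PySem.List.count food t : Nat) : Int) := by
        have e1 : List.countP (fun q : Int × Int => decide (q.2 = t)) ((i0, t) :: Qt)
            = List.countP (fun q : Int × Int => decide (q.2 = t))
                (List.filter (fun q => C q.2) (PySem.List.enumerate food 0)) :=
          hQ.countP_eq _
        have e2 : List.countP (fun a : Int × Int => decide (a.2 = t) && C a.2)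
            (PySem.List.enumerate food 0)
            = List.countP (fun a : Int × Int => decide (a.2 = t))
                (PySem.List.enumerate food 0) := by
          apply List.countP_congr
          intro q _
          constructor
          · intro h
            exact (Bool.and_eq_true_iff.mp h).1
          · intro h
            have h' : q.2 = t := of_decide_eq_true h
            rw [Bool.and_eq_true_iff]
            exact ⟨h, by rw [h']; exact hCt⟩
        have e3 : List.countP (fun a : Int × Int => decide (a.2 = t))
            (PySem.List.enumerate food 0)
            = List.countP (fun x : Int => decide (x = t)) food := by
          conv_rhs => rw [← PySem.List.map_snd_enumerate food 0]
          rw [List.countP_map]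
          rfl
        have e4 : List.countP (fun x : Int => decide (x = t)) food = List.count t food := by
          rw [List.count]
          exact List.countP_congr (by intro x _; simp)
        rw [e1, List.countP_filter, e2, e3, e4, PySem.List.count_eq]
      simp only [solLoopA, solLoopB, if_pos hcntpos, PySem.List.len_eq]
      rw [← hl]
      by_cases hk : (t - p) * l ≤ k
      · rw [if_pos hk, if_pos hk]
        have hdw := dropWhile_eq_filter_of_sorted t ((i0, t) :: Qt) hpwQ ht_le_all
        rw [hdw]
        apply ih _ _ _ _ (fun x => decide (t < x)) (List.pairwise_cons.mp hpwV).2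
        · intro x
          constructor
          · intro hx
            have hxV : x ∈ t :: ts := List.mem_cons_of_mem t hx
            have := (hV x).mp hxV
            refine ⟨this.1, ?_⟩
            have := (List.pairwise_cons.mp hpwV).1 x hx
            simp
            omega
          · rintro ⟨hxf, hxt⟩
            have hxt' : t < x := by simpa using hxt
            have hCx : C x = true := hC t x hCt (le_of_lt hxt')
            rcases List.mem_cons.mp ((hV x).mpr ⟨hxf, hCx⟩) with h | h
            · omega
            · exact h
        · intro x y hx hxy
          simp at hx ⊢
          omega
        · exact List.Pairwise.filter _ hpwQ
        · -- permutation for the filtered tail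
          have h1 := hQ.filter (fun q => decide (t < q.2))
          rw [List.filter_filter] at h1
          have e5 : List.filter (fun a : Int × Int => decide (t < a.2) && C a.2)
              (PySem.List.enumerate food 0)
              = List.filter (fun q : Int × Int => decide (t < q.2))
                  (PySem.List.enumerate food 0) := by
            apply List.filter_congr
            intro q _
            by_cases hlt : t < q.2
            · have hc2 : C q.2 = true := hC t q.2 hCt (le_of_lt hlt)
              simp [hlt, hc2]
            · simp [hlt]
          rw [e5] at h1
          exact h1
        · -- length bookkeeping
          have hflen : (((i0, t) :: Qt).filter (fun q => decide (t < q.2))).length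
              = ((i0, t) :: Qt).length - ((i0, t) :: Qt).countP (fun q => decide (q.2 = t)) := by
            rw [← List.countP_eq_length_filter]
            rw [List.countP_congr (p := fun q : Int × Int => decide (t < q.2))
              (q := fun q : Int × Int => !(decide (q.2 = t))) (by
                intro q hq
                have := ht_le_all q hq
                constructor
                · intro h; simp at h ⊢; omega
                · intro h; simp at h ⊢; omega)]
            have hsum := countP_not_aux (fun q : Int × Int => decide (q.2 = t)) ((i0, t) :: Qt)
            omega
          rw [hflen]
          have hle := List.countP_le_length (p := fun q : Int × Int => decide (q.2 = t))
            (l := (i0, t) :: Qt)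
          omega
      · rw [if_neg hk, if_neg hk]
        have hm := PySem.Int.mod_nonneg k hlpos
        have hml := PySem.Int.mod_lt k hlpos
        have horder : (if PySem.Int.mod k l = 0 then 1 else PySem.Int.mod k l + 1)
            = ((PySem.Int.mod k l).toNat : Int) + 1 := by
          rw [Int.toNat_of_nonneg hm]
          by_cases h : PySem.Int.mod k l = 0 <;> simp [h]
        rw [horder, solInnerA_char]
        -- the filtered enumeration is exactly the pairs with time ≥ t
        have hEfil : (PySem.List.enumerate food 0).filter (fun q => C q.2)
            = (PySem.List.enumerate food 0).filter (fun q => decide (t ≤ q.2)) := by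
          apply List.filter_congr
          intro q hq
          have hqfood : q.2 ∈ food := by
            have h := PySem.List.map_snd_enumerate food 0
            rw [← h]
            exact List.mem_map_of_mem hq
          by_cases hle : t ≤ q.2
          · have : C q.2 = true := by
              rcases eq_or_lt_of_le hle with h | h
              · rw [← h]; exact hCt
              · exact hC t q.2 hCt hle
            simp [hle, this]
          · have : ¬ C q.2 = true := by
              intro hCq
              have hqV : q.2 ∈ t :: ts := (hV q.2).mpr ⟨hqfood, hCq⟩
              rcases List.mem_cons.mp hqV with h | h
              · omega
              · have := (List.pairwise_cons.mp hpwV).1 q.2 h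
                omega
            simp [hle, this]
        have hSlen : ((((PySem.List.enumerate food 0).filter
            (fun q => decide (t ≤ q.2))).map Prod.fst).length : Int) = l := by
          rw [List.length_map, ← hEfil, ← hQ.length_eq, hl]
        have hr : (PySem.Int.mod k l).toNat
            < (((PySem.List.enumerate food 0).filter
                (fun q => decide (t ≤ q.2))).map Prod.fst).length := by
          omega
        rw [List.getElem?_eq_getElem hr]
        have hsorted : PySem.List.sorted (((i0, t) :: Qt).map Prod.fst) (fun x => x) false
            = ((PySem.List.enumerate food 0).filter (fun q => decide (t ≤ q.2))).map Prod.fst := by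
          apply PySem.List.sorted_eq_of_perm_of_pairwise_lt
          · rw [← hEfil]
            exact (hQ.map Prod.fst).symm
          · rw [List.pairwise_map]
            exact List.Pairwise.filter _ (PySem.List.pairwise_lt_enumerate food 0)
        rw [hsorted]
        rw [PySem.List.pyGetD_eq_getElem _ 0 hm (by omega)]
        simp
  

-- ===== VERDICT (by name: the statement is the Claim_ definition above) =====
theorem solution_spec : Claim_equal_solution := by
  unfold Claim_equal_solution
  intro food k _ hpre
  show solution food k = solution_alt food k
  unfold solution solution_alt
  by_cases hs : food.sum ≤ k
  · rw [if_pos hs, if_pos hs]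
  · rw [if_neg hs, if_neg hs]
    have hne : food ≠ [] := by
      intro he
      subst he
      rcases hpre with h | h
      · exact h rfl
      · simp only [List.sum_nil] at hs
        omega
    obtain ⟨mn, hmn⟩ : ∃ mn, PySem.List.min? food (fun x => x) = some mn := by
      cases h : PySem.List.min? food (fun x => x) with
      | none => exact absurd ((PySem.List.min?_eq_none_iff _ _).mp h) hne
      | some mn => exact ⟨mn, rfl⟩
    obtain ⟨mx, hmx⟩ : ∃ mx, PySem.List.max? food (fun x => x) = some mx := by
      cases h : PySem.List.max? food (fun x => x) with
      | none => exact absurd ((PySem.List.max?_eq_none_iff _ _).mp h) hne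
      | some mx => exact ⟨mx, rfl⟩
    rw [hmn, hmx]
    show (solLoopA food (PySem.List.pyRange mn (mx + 1) 1) k (PySem.List.len food) 0).getD 0 = _
    rw [solLoopA_filter, solValues_eq food mn mx hmn hmx]
    apply solLoop_eq food _ _ k (PySem.List.len food) 0 (fun _ => true)
    · exact PySem.List.sorted_ofList_pairwise_lt food
    · intro x
      simp [PySem.List.mem_sorted, PySem.Set.mem_ofList]
    · intro x y _ _
      rfl
    · exact PySem.List.sorted_pairwise (PySem.List.enumerate food 0) (fun p => p.2)
    · rw [List.filter_true]
      exact PySem.List.sorted_perm (PySem.List.enumerate food 0) (fun p => p.2) false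
    · rw [PySem.List.len_eq, PySem.List.length_sorted, PySem.List.length_enumerate]
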